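-- pv_equiv track=rewrite | github.com/Zer0Hiro/Python-Practice | EXAMS/2022B.py | is_packed
-- ===== SOURCE A (Python) =====
-- def is_packed(lst):
--     mx = max(lst)
--     mn = min(lst)
--     testl = []
--     for x in range(mn,mx+1):
--         testl.append(x)
--     for num in testl:
--         if num not in lst:
--             return False
--     return True
-- ===== SOURCE B (Python) =====
-- def is_packed(lst):
--     return sorted(set(lst)) == list(range(min(lst), max(lst) + 1))
-- ===== Notes on version B (the rewrite author's own statement) =====
-- stated objective: simpler
-- what changed: Replaces the per-range-value membership scan over lst with a one-liner: deduplicate, sort, and compare to the contiguous range list for equality.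
-- outside the precondition, e.g. on is_packed([]): A raises ValueError, B raises ValueError
import Mathlib
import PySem

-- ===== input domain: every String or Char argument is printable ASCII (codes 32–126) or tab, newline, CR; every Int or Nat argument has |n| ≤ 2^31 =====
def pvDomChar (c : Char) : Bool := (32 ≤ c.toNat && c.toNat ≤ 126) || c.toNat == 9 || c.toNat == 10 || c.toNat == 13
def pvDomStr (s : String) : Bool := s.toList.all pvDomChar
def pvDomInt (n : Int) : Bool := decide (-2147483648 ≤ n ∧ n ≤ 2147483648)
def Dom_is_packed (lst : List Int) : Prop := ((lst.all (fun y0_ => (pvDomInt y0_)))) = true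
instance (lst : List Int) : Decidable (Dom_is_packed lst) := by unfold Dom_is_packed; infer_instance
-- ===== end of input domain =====

-- B replaces A's per-range-value membership scans with sorted(set(lst)) == list(range(min,max+1)); objective: simpler.

-- ===== PORT A =====
-- the 'for num in testl: if num not in lst: return False' early-return loop
def isPackedCheck (testl : List Int) (lst : List Int) : Bool :=
  match testl with
  | [] => true
  | num :: rest => if !(lst.contains num) then false else isPackedCheck rest lst

def is_packed (lst : List Int) : Bool :=
  match PySem.List.max? lst (fun x => x), PySem.List.min? lst (fun x => x) with
  | some mx, some mn =>
      let testl := (PySem.List.pyRange mn (mx + 1) 1).foldl (fun acc x => acc ++ [x]) []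
      isPackedCheck testl lst
  | _, _ => false   -- Python raises ValueError on the empty list; excluded by Pre_

-- ===== PORT B =====
def is_packed_alt (lst : List Int) : Bool :=
  match PySem.List.min? lst (fun x => x) with
  | none => false   -- Python raises ValueError on the empty list; excluded by Pre_
  | some mn =>
      match PySem.List.max? lst (fun x => x) with
      | none => false
      | some mx =>
          decide (PySem.List.sorted (PySem.Set.ofList lst) (fun x => x) false
                    = PySem.List.pyRange mn (mx + 1) 1)

-- ===== PRECONDITION & SPEC =====
-- Pre_ excludes only the empty list, on which both A (max([])) and B (min([])) raise ValueError.
def Pre_is_packed (lst : List Int) : Prop := lst ≠ []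
instance (lst : List Int) : Decidable (Pre_is_packed lst) := by unfold Pre_is_packed; infer_instance
def pvWitness_is_packed : List Int := [2, 1, 3]

def Spec_is_packed (lst : List Int) (out : Bool) : Prop := out = is_packed_alt lst
instance (lst : List Int) (out : Bool) : Decidable (Spec_is_packed lst out) := by unfold Spec_is_packed; infer_instance

-- ===== CLAIM (what is proved, stated in full; the proofs are below) =====
def Claim_equal_is_packed : Prop := ∀ (lst : List Int), Dom_is_packed lst → Pre_is_packed lst → Spec_is_packed lst (is_packed lst)

-- ===== LEMMAS AND PROOFS =====

theorem foldl_append_singleton (l acc : List Int) :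
    l.foldl (fun acc x => acc ++ [x]) acc = acc ++ l := by
  induction l generalizing acc with
  | nil => simp
  | cons x t ih => simp [List.foldl, ih]

theorem isPackedCheck_eq_all (testl lst : List Int) :
    isPackedCheck testl lst = testl.all (fun n => lst.contains n) := by
  induction testl with
  | nil => rfl
  | cons n t ih =>
      by_cases h : lst.contains n = true <;> simp [isPackedCheck, h, ih]

theorem key_iff (lst : List Int) (mn mx : Int)
    (hmn : PySem.List.min? lst (fun x => x) = some mn)
    (hmx : PySem.List.max? lst (fun x => x) = some mx) :
    ((PySem.List.pyRange mn (mx + 1) 1).all (fun n => lst.contains n) = true) ↔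
      PySem.List.sorted (PySem.Set.ofList lst) (fun x => x) false
        = PySem.List.pyRange mn (mx + 1) 1 := by
  constructor
  · intro hall
    have hS : (PySem.List.sorted (PySem.Set.ofList lst) (fun x => x) false).Pairwise (· < ·) :=
      PySem.List.sorted_ofList_pairwise_lt lst
    have hR : (PySem.List.pyRange mn (mx + 1) 1).Pairwise (· < ·) :=
      PySem.List.pairwise_lt_pyRange_one mn (mx + 1)
    have hmem : ∀ a : Int,
        a ∈ PySem.List.sorted (PySem.Set.ofList lst) (fun x => x) false ↔
        a ∈ PySem.List.pyRange mn (mx + 1) 1 := by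
      intro a
      rw [PySem.List.mem_sorted, PySem.Set.mem_ofList, PySem.List.mem_pyRange_one]
      constructor
      · intro ha
        have h1 := PySem.List.min?_isMin hmn a ha
        have h2 := PySem.List.max?_isMax hmx a ha
        exact ⟨h1, by omega⟩
      · intro ha
        have := (List.all_eq_true).mp hall a
          (by rw [PySem.List.mem_pyRange_one]; exact ha)
        simpa using this
    exact List.eq_of_perm_of_sorted
      (fun a b _ _ h1 h2 => absurd h2 (lt_asymm h1))
      hS hR
      ((List.perm_ext_iff_of_nodup
          (hS.imp fun h => ne_of_lt h) (hR.imp fun h => ne_of_lt h)).mpr hmem)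
  · intro heq
    rw [List.all_eq_true]
    intro a ha
    have : a ∈ PySem.List.sorted (PySem.Set.ofList lst) (fun x => x) false := by
      rw [heq]; exact ha
    rw [PySem.List.mem_sorted, PySem.Set.mem_ofList] at this
    simpa using this

-- ===== VERDICT (by name: the statement is the Claim_ definition above) =====
theorem is_packed_spec : Claim_equal_is_packed := by
  intro lst _ hpre
  unfold Spec_is_packed is_packed is_packed_alt
  obtain ⟨mn, hmn⟩ : ∃ mn, PySem.List.min? lst (fun x => x) = some mn := by
    cases h : PySem.List.min? lst (fun x => x) with
    | none => exact absurd ((PySem.List.min?_eq_none_iff _ _).mp h) hpre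
    | some m => exact ⟨m, rfl⟩
  obtain ⟨mx, hmx⟩ : ∃ mx, PySem.List.max? lst (fun x => x) = some mx := by
    cases h : PySem.List.max? lst (fun x => x) with
    | none => exact absurd ((PySem.List.max?_eq_none_iff _ _).mp h) hpre
    | some m => exact ⟨m, rfl⟩
  rw [hmn, hmx]
  simp only [foldl_append_singleton, List.nil_append, isPackedCheck_eq_all]
  rw [Bool.eq_iff_iff, decide_eq_true_iff]
  exact key_iff lst mn mx hmn hmx
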